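-- pv_equiv track=rewrite | github.com/SafaObuz/Visual-Ed | vision/eyeDetector.py | combine_eyes
-- ===== SOURCE A (Python) =====
-- def combine_eyes(eyes):
--     eye = eyes[0]
--
--     minX = eye[0]
--     minY = eye[1]
--     maxX = minX + eye[2]
--     maxY = minY + eye[3]
--
--     for (x, y, w, h) in eyes:
--         minX = min(minX, x)
--         minY = min(minY, y)
--
--         maxX = max(maxX, x + w)
--         maxY = max(maxY, y + h)
--
--     return (minX, minY, maxX - minX, maxY - minY)
-- ===== SOURCE B (Python) =====
-- def combine_eyes(eyes):
--     minX = min(x for (x, y, w, h) in eyes)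
--     minY = min(y for (x, y, w, h) in eyes)
--     maxX = max(x + w for (x, y, w, h) in eyes)
--     maxY = max(y + h for (x, y, w, h) in eyes)
--     return (minX, minY, maxX - minX, maxY - minY)
-- ===== Notes on version B (the rewrite author's own statement) =====
-- stated objective: idiomatic
-- what changed: B computes each bound with its own built-in min/max reduction over the list instead of A's fused four-accumulator loop seeded from eyes[0]; Pre_ excludes the empty list, on which both programs raise (A IndexError, B ValueError).
import Mathlib
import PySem

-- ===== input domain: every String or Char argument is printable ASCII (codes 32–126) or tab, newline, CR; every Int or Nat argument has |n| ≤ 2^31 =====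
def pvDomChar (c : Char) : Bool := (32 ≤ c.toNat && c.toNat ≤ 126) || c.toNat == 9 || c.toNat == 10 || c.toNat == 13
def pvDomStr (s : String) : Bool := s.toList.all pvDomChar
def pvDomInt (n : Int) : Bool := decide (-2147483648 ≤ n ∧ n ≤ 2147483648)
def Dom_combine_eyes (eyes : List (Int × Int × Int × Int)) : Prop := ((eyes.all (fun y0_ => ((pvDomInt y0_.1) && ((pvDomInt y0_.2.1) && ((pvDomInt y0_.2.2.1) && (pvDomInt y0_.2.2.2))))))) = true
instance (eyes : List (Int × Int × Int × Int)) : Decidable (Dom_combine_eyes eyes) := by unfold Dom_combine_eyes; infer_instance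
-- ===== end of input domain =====

-- B: each bound via its own built-in min/max reduction instead of A's fused accumulator loop (idiomatic decomposition).
-- ===== PORT A =====
def combine_eyes (eyes : List (Int × Int × Int × Int)) : Int × Int × Int × Int :=
  match eyes with
  | [] => (0, 0, 0, 0)   -- unreachable under Pre_ (Python: eyes[0] raises IndexError)
  | eye :: _ =>
    let s := eyes.foldl
      (fun (s : Int × Int × Int × Int) p =>
        (min s.1 p.1, min s.2.1 p.2.1,
         max s.2.2.1 (p.1 + p.2.2.1), max s.2.2.2 (p.2.1 + p.2.2.2)))
      (eye.1, eye.2.1, eye.1 + eye.2.2.1, eye.2.1 + eye.2.2.2)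
    (s.1, s.2.1, s.2.2.1 - s.1, s.2.2.2 - s.2.1)

-- ===== PORT B =====
def combine_eyes_alt (eyes : List (Int × Int × Int × Int)) : Int × Int × Int × Int :=
  match PySem.List.min? (eyes.map fun p => p.1) (fun v => v),
        PySem.List.min? (eyes.map fun p => p.2.1) (fun v => v),
        PySem.List.max? (eyes.map fun p => p.1 + p.2.2.1) (fun v => v),
        PySem.List.max? (eyes.map fun p => p.2.1 + p.2.2.2) (fun v => v) with
  | some minX, some minY, some maxX, some maxY => (minX, minY, maxX - minX, maxY - minY)
  | _, _, _, _ => (0, 0, 0, 0)   -- unreachable under Pre_ (Python: min() of empty raises ValueError)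

-- ===== PRECONDITION & SPEC =====
-- Pre_ excludes only the empty list, on which A raises IndexError (and B raises ValueError).
def Pre_combine_eyes (eyes : List (Int × Int × Int × Int)) : Prop := eyes ≠ []
instance (eyes : List (Int × Int × Int × Int)) : Decidable (Pre_combine_eyes eyes) := by unfold Pre_combine_eyes; infer_instance
def pvWitness_combine_eyes : (List (Int × Int × Int × Int)) := [(1, 2, 3, 4), (0, 5, 10, 1)]

def Spec_combine_eyes (eyes : List (Int × Int × Int × Int)) (out : Int × Int × Int × Int) : Prop := out = combine_eyes_alt eyes
instance (eyes : List (Int × Int × Int × Int)) (out : Int × Int × Int × Int) : Decidable (Spec_combine_eyes eyes out) := by unfold Spec_combine_eyes; infer_instance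

-- ===== CLAIM (what is proved, stated in full; the proofs are below) =====
def Claim_equal_combine_eyes : Prop := ∀ (eyes : List (Int × Int × Int × Int)), Dom_combine_eyes eyes → Pre_combine_eyes eyes → Spec_combine_eyes eyes (combine_eyes eyes)

-- ===== LEMMAS AND PROOFS =====

-- ===== VERDICT (by name: the statement is the Claim_ definition above) =====
lemma foldA_split (l : List (Int × Int × Int × Int)) (a b c d : Int) :
    l.foldl
      (fun (s : Int × Int × Int × Int) p =>
        (min s.1 p.1, min s.2.1 p.2.1,
         max s.2.2.1 (p.1 + p.2.2.1), max s.2.2.2 (p.2.1 + p.2.2.2)))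
      (a, b, c, d)
    = (l.foldl (fun s p => min s p.1) a,
       l.foldl (fun s p => min s p.2.1) b,
       l.foldl (fun s p => max s (p.1 + p.2.2.1)) c,
       l.foldl (fun s p => max s (p.2.1 + p.2.2.2)) d) := by
  induction l generalizing a b c d with
  | nil => rfl
  | cons p t ih => simp [List.foldl, ih]

theorem combine_eyes_spec : Claim_equal_combine_eyes := by
  intro eyes _ hpre
  unfold Spec_combine_eyes
  match eyes with
  | [] => exact absurd rfl hpre
  | e :: rest =>
    simp only [combine_eyes, combine_eyes_alt, List.map_cons,
      PySem.List.min?_id_cons, PySem.List.max?_id_cons,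
      List.foldl_map, List.foldl_cons, foldA_split,
      min_self, max_self]
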